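-- pv_equiv track=rewrite | github.com/cholandy/algorithms | Algorithm and Data Structure/Baekjoon/1713번 후보 추천하기/1713.py | goodbye
-- ===== SOURCE A (Python) =====
-- def goodbye(arr):
--     minimum=1000
--     gg=[]
--     for i in range(len(arr)):
--         if arr[i][1]>0 and arr[i][1] <= minimum:
--             minimum = arr[i][1]
--     for o in range(len(arr)):
--         if arr[o][1]==minimum:
--             gg.append(o)
--     return gg
-- ===== SOURCE B (Python) =====
-- def goodbye(arr):
--     minimum = 1000
--     gg = []
--     for i, row in enumerate(arr):
--         v = row[1]
--         if v > 0:
--             if v < minimum: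
--                 minimum = v
--                 gg = [i]
--             elif v == minimum:
--                 gg.append(i)
--     return gg
-- ===== Notes on version B (the rewrite author's own statement) =====
-- stated objective: simpler
-- what changed: Replaces A's two passes (one to find the minimum positive second field, one to collect matching indices) by a single pass that maintains the running minimum together with the index list, resetting the list on a strictly smaller value and appending on a tie.
import Mathlib
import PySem

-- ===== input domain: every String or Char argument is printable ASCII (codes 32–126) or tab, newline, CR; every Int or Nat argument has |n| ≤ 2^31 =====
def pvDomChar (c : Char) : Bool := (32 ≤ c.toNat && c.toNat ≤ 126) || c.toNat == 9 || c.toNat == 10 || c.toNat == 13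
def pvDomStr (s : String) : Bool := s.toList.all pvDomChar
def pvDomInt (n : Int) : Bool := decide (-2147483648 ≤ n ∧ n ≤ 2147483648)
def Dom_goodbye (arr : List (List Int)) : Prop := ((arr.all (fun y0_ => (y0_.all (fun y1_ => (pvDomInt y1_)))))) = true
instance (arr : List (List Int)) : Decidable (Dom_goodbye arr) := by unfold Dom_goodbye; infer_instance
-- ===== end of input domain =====

-- B replaces A's two passes by a single pass keeping the running minimum and the index list together (simpler, same O(n) cost).

-- ===== PORT A =====
def goodbye (arr : List (List Int)) : List Int :=
  let minimum : Int :=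
    (PySem.List.pyRange 0 arr.length 1).foldl
      (fun m i =>
        if PySem.List.pyGetD (PySem.List.pyGetD arr i []) 1 0 > 0 ∧
           PySem.List.pyGetD (PySem.List.pyGetD arr i []) 1 0 ≤ m then
          PySem.List.pyGetD (PySem.List.pyGetD arr i []) 1 0
        else m) 1000
  (PySem.List.pyRange 0 arr.length 1).foldl
    (fun gg o =>
      if PySem.List.pyGetD (PySem.List.pyGetD arr o []) 1 0 = minimum then gg ++ [o] else gg) []

-- ===== PORT B =====
def goodbye_alt (arr : List (List Int)) : List Int :=
  ((PySem.List.enumerate arr 0).foldl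
    (fun (st : Int × List Int) p =>
      let v := PySem.List.pyGetD p.2 1 0
      if 0 < v then
        if v < st.1 then (v, [p.1])
        else if v = st.1 then (st.1, st.2 ++ [p.1])
        else st
      else st) (1000, ([] : List Int))).2

-- ===== PRECONDITION & SPEC =====
-- Pre_ excludes exactly the inputs on which Python A raises IndexError: a row shorter than 2 elements.
def Pre_goodbye (arr : List (List Int)) : Prop := ∀ row ∈ arr, 2 ≤ row.length
instance (arr : List (List Int)) : Decidable (Pre_goodbye arr) := by unfold Pre_goodbye; infer_instance
def pvWitness_goodbye : List (List Int) := [[1, 5], [2, 5], [3, 7]]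
def Spec_goodbye (arr : List (List Int)) (out : List Int) : Prop := out = goodbye_alt arr
instance (arr : List (List Int)) (out : List Int) : Decidable (Spec_goodbye arr out) := by unfold Spec_goodbye; infer_instance

-- ===== CLAIM (what is proved, stated in full; the proofs are below) =====
def Claim_equal_goodbye : Prop := ∀ (arr : List (List Int)), Dom_goodbye arr → Pre_goodbye arr → Spec_goodbye arr (goodbye arr)

-- ===== LEMMAS AND PROOFS =====

/-- second field of a row, as both ports read it -/
def pvVal (row : List Int) : Int := PySem.List.pyGetD row 1 0

/-- A's minimum-update step -/
def pvAStep (m v : Int) : Int := if v > 0 ∧ v ≤ m then v else m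

/-- B's single-pass step -/
def pvBStep (st : Int × List Int) (p : Int × List Int) : Int × List Int :=
  let v := PySem.List.pyGetD p.2 1 0
  if 0 < v then
    if v < st.1 then (v, [p.1])
    else if v = st.1 then (st.1, st.2 ++ [p.1])
    else st
  else st

theorem pvBStep_reset (st p) (hv : 0 < pvVal p.2) (hlt : pvVal p.2 < st.1) :
    pvBStep st p = (pvVal p.2, [p.1]) := by
  unfold pvBStep pvVal at *
  rw [if_pos hv, if_pos hlt]

theorem pvBStep_tie (st p) (hv : 0 < pvVal p.2) (hlt : ¬ pvVal p.2 < st.1)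
    (heq : pvVal p.2 = st.1) : pvBStep st p = (st.1, st.2 ++ [p.1]) := by
  unfold pvBStep pvVal at *
  rw [if_pos hv, if_neg hlt, if_pos heq]

theorem pvBStep_skip_big (st p) (hv : 0 < pvVal p.2) (hlt : ¬ pvVal p.2 < st.1)
    (heq : ¬ pvVal p.2 = st.1) : pvBStep st p = st := by
  unfold pvBStep pvVal at *
  rw [if_pos hv, if_neg hlt, if_neg heq]

theorem pvBStep_skip_nonpos (st p) (hv : ¬ 0 < pvVal p.2) : pvBStep st p = st := by
  unfold pvBStep pvVal at *
  rw [if_neg hv]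

theorem pvAStep_le (m v : Int) : pvAStep m v ≤ m := by
  unfold pvAStep; split_ifs with h
  · exact h.2
  · exact le_refl m

theorem pvAStep_pos (m v : Int) (hm : 0 < m) : 0 < pvAStep m v := by
  unfold pvAStep; split_ifs with h
  · exact h.1
  · exact hm

theorem pvM_le (l : List (Int × List Int)) (m : Int) :
    l.foldl (fun m p => pvAStep m (pvVal p.2)) m ≤ m := by
  induction l generalizing m with
  | nil => simp [List.foldl]
  | cons x t ih =>
      simp only [List.foldl]
      exact le_trans (ih _) (pvAStep_le _ _)

theorem pvM_pos (l : List (Int × List Int)) (m : Int) (hm : 0 < m) :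
    0 < l.foldl (fun m p => pvAStep m (pvVal p.2)) m := by
  induction l generalizing m with
  | nil => simpa [List.foldl] using hm
  | cons x t ih =>
      simp only [List.foldl]
      exact ih _ (pvAStep_pos _ _ hm)

theorem pvCollect_eq (l : List (Int × List Int)) (mv : Int) (gg : List Int) :
    l.foldl (fun gg p => if pvVal p.2 = mv then gg ++ [p.1] else gg) gg
      = gg ++ (l.filter (fun p => decide (pvVal p.2 = mv))).map (·.1) := by
  induction l generalizing gg with
  | nil => simp
  | cons x t ih =>
      simp only [List.foldl, List.filter_cons]
      by_cases h : pvVal x.2 = mv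
      · simp [h, ih]
      · simp [h, ih]

/-- invariant of B's single pass: its state after a prefix is A's minimum of that prefix
    together with the indices whose value equals it (the initial list surviving only if the
    minimum did not drop). -/
theorem pvBfold (l : List (Int × List Int)) (m : Int) (gg : List Int) (hm : 0 < m) :
    l.foldl pvBStep (m, gg)
    = (l.foldl (fun m p => pvAStep m (pvVal p.2)) m,
       (if l.foldl (fun m p => pvAStep m (pvVal p.2)) m = m then gg else []) ++
         (l.filter (fun p =>
            decide (pvVal p.2 = l.foldl (fun m p => pvAStep m (pvVal p.2)) m))).map (·.1)) := by
  induction l generalizing m gg with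
  | nil => simp
  | cons x t ih =>
      simp only [List.foldl, List.filter_cons]
      by_cases hv : 0 < pvVal x.2
      · by_cases hlt : pvVal x.2 < m
        · -- strictly smaller value: B resets the list
          have hstep : pvAStep m (pvVal x.2) = pvVal x.2 := by
            unfold pvAStep; rw [if_pos ⟨hv, le_of_lt hlt⟩]
          have hMle : t.foldl (fun m p => pvAStep m (pvVal p.2)) (pvVal x.2) ≤ pvVal x.2 :=
            pvM_le t _
          simp only [hstep]
          rw [pvBStep_reset _ _ hv hlt, ih _ _ hv]
          have hne : ¬ t.foldl (fun m p => pvAStep m (pvVal p.2)) (pvVal x.2) = m := by omega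
          rw [if_neg hne]
          by_cases hx : pvVal x.2 = t.foldl (fun m p => pvAStep m (pvVal p.2)) (pvVal x.2)
          · simp [← hx]
          · rw [if_neg (fun h => hx h.symm)]
            simp [hx]
        · by_cases heq : pvVal x.2 = m
          · -- tie with the running minimum: B appends
            have hstep : pvAStep m (pvVal x.2) = m := by
              unfold pvAStep; rw [if_pos ⟨hv, le_of_eq heq⟩]; exact heq
            simp only [hstep]
            rw [pvBStep_tie _ _ hv hlt heq, ih _ _ hm]
            by_cases hMm : t.foldl (fun m p => pvAStep m (pvVal p.2)) m = m
            · have hxM : pvVal x.2 = t.foldl (fun m p => pvAStep m (pvVal p.2)) m := by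
                rw [hMm]; exact heq
              simp [hxM, hMm]
            · have hxM : ¬ pvVal x.2 = t.foldl (fun m p => pvAStep m (pvVal p.2)) m := by
                rw [heq]; exact fun h => hMm h.symm
              simp [hxM, hMm]
          · -- larger value: B ignores it
            have hstep : pvAStep m (pvVal x.2) = m := by
              unfold pvAStep
              rw [if_neg]; rintro ⟨_, hle⟩
              exact heq (le_antisymm hle (by omega))
            have hMle : t.foldl (fun m p => pvAStep m (pvVal p.2)) m ≤ m := pvM_le t _
            have hxM : ¬ pvVal x.2 = t.foldl (fun m p => pvAStep m (pvVal p.2)) m := by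
              intro h; omega
            simp only [hstep]
            rw [pvBStep_skip_big _ _ hv hlt heq, ih _ _ hm]
            simp [hxM]
      · -- non-positive value: both ports skip it
        have hstep : pvAStep m (pvVal x.2) = m := by
          unfold pvAStep; rw [if_neg]; rintro ⟨h0, _⟩; exact hv h0
        have hxM : ¬ pvVal x.2 = t.foldl (fun m p => pvAStep m (pvVal p.2)) m := by
          intro h
          exact hv (h ▸ pvM_pos t m hm)
        simp only [hstep]
        rw [pvBStep_skip_nonpos _ _ hv, ih _ _ hm]
        simp [hxM]

/-- A's two range-folds, rewritten as folds over the enumerated list -/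
theorem goodbye_eq_enum (arr : List (List Int)) :
    goodbye arr =
      (PySem.List.enumerate arr 0).foldl
        (fun gg p =>
          if pvVal p.2 = (PySem.List.enumerate arr 0).foldl
              (fun m p => pvAStep m (pvVal p.2)) 1000 then gg ++ [p.1] else gg) [] := by
  unfold goodbye
  rw [PySem.List.enumerate_eq_map_pyRange arr ([] : List Int), List.foldl_map, List.foldl_map]
  simp only [pvAStep, pvVal, PySem.List.len]

/-- B's port, rewritten as a fold of pvBStep over the enumerated list -/
theorem goodbye_alt_eq_enum (arr : List (List Int)) :
    goodbye_alt arr = ((PySem.List.enumerate arr 0).foldl pvBStep (1000, [])).2 := rfl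

theorem goodbye_eq (arr : List (List Int)) : goodbye arr = goodbye_alt arr := by
  rw [goodbye_eq_enum, goodbye_alt_eq_enum, pvBfold _ 1000 [] (by norm_num), pvCollect_eq]
  simp

-- ===== VERDICT (by name: the statement is the Claim_ definition above) =====
theorem goodbye_spec : Claim_equal_goodbye := by
  intro arr _ _
  simpa [Spec_goodbye] using goodbye_eq arr
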